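-- pv_equiv track=rewrite | github.com/Typelias/AR_Assignments | Assignment5/segmentation.py | colorPoints
-- ===== SOURCE A (Python) =====
-- from typing import List, Tuple
-- import collections
--
-- def colorPoints(points: List[List], categories: List[List], centers: List[List]) -> List[List]:
--     compare = lambda x, y: collections.Counter(x) == collections.Counter(y)
--     for i, cat in enumerate(categories):
--         for p in cat:
--             indexes = [i for i,x in enumerate(points) if compare(x,p)]
--             for j in indexes:
--                 points[j] = centers[i]
--     return points
-- ===== SOURCE B (Python) =====
-- def colorPoints(points, categories, centers):
--     # Index points by their sorted-tuple (multiset) key once, then update the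
--     # index incrementally as points are reassigned to category centers.
--     idx = {}
--     for j, x in enumerate(points):
--         idx.setdefault(tuple(sorted(x)), []).append(j)
--     for i, cat in enumerate(categories):
--         for p in cat:
--             kp = tuple(sorted(p))
--             js = idx.get(kp)
--             if js:
--                 c = centers[i]
--                 for j in js:
--                     points[j] = c
--                 ck = tuple(sorted(c))
--                 if ck != kp:
--                     idx.setdefault(ck, []).extend(js)
--                     idx[kp] = []
--     return points
-- ===== Notes on version B (the rewrite author's own statement) =====
-- stated objective: faster
-- what changed: Instead of rescanning all points with a Counter comparison for every category member, B builds one hash index from sorted-tuple (multiset) key to the list of point indices and updates it incrementally when points are reassigned, so each category member is a single dict lookup.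
-- outside the precondition, e.g. on colorPoints([[1]], [[[1]], [[1]]], [[2]]): A returns [[2]], B returns [[2]]
import Mathlib
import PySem

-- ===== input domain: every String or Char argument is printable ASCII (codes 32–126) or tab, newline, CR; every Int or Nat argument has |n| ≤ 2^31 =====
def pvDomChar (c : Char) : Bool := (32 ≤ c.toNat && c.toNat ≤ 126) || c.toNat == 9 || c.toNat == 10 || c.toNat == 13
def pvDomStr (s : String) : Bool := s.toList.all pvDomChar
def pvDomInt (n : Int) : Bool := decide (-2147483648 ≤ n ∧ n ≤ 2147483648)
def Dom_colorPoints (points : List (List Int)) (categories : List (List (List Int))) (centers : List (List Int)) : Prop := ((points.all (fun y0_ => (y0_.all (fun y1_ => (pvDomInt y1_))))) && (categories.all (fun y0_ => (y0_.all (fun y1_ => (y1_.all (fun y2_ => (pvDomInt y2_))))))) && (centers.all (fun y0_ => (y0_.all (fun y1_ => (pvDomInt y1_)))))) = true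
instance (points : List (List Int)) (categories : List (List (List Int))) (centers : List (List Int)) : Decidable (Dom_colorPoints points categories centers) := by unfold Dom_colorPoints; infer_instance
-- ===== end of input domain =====

-- B replaces A's per-category-member rescan of all points (a Counter comparison against every
-- point) by one hash index from sorted-list (multiset) key to point indices, updated
-- incrementally on reassignment. Both Pythons mutate `points` in place identically and return
-- it; the theorems are about the returned value.

-- ===== PORT A =====
-- compare = lambda x, y: Counter(x) == Counter(y)  — i.e. multiset equality of the two lists
def pvCmp (x y : List Int) : Bool := decide ((Multiset.ofList x) = (Multiset.ofList y))

def colorPoints (points : List (List Int)) (categories : List (List (List Int))) (centers : List (List Int)) : List (List Int) :=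
  (PySem.List.enumerate categories 0).foldl (fun pts ic =>
    ic.2.foldl (fun pts p =>
      let indexes := ((PySem.List.enumerate pts 0).filter (fun jx => pvCmp jx.2 p)).map (fun jx => jx.1)
      indexes.foldl (fun pts j => PySem.List.pySetD pts j (PySem.List.pyGetD centers ic.1 [])) pts) pts) points

-- ===== PORT B =====
-- tuple(sorted(x)) : the multiset key of a point
def pvKey (x : List Int) : List Int := PySem.List.sorted x (fun v => v) false

-- the body of B's inner loop (one category member p, category index i)
def pvBodyB (centers : List (List Int)) (i : Int)
    (s : List (List Int) × PySem.Dict (List Int) (List Int)) (p : List Int) :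
    List (List Int) × PySem.Dict (List Int) (List Int) :=
  let kp := pvKey p
  let js := s.2.getD kp []
  if js = [] then s
  else
    let c := PySem.List.pyGetD centers i []
    let pts := js.foldl (fun pts j => PySem.List.pySetD pts j c) s.1
    let ck := pvKey c
    if ck = kp then (pts, s.2)
    else (pts, (s.2.modify ck [] (fun l => l ++ js)).insert kp [])

def colorPoints_alt (points : List (List Int)) (categories : List (List (List Int))) (centers : List (List Int)) : List (List Int) :=
  let idx0 : PySem.Dict (List Int) (List Int) :=
    (PySem.List.enumerate points 0).foldl
      (fun d jx => d.modify (pvKey jx.2) [] (fun l => l ++ [jx.1])) PySem.Dict.empty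
  ((PySem.List.enumerate categories 0).foldl
    (fun s ic => ic.2.foldl (pvBodyB centers ic.1) s) (points, idx0)).1

-- ===== PRECONDITION & SPEC =====
-- A raises IndexError on centers[i] as soon as a member of a category with index i ≥
-- len(centers) matches a current point. Every current point is an initial point or a center,
-- so Pre_ requires that members of such out-of-range categories are permutations of no initial
-- point and no center: then no match can ever occur and A returns. The exact raise set depends
-- on which replacements actually happened, so this closed-form Pre_ still excludes a few
-- inputs where the matching point was already replaced and A returns (see cites).
def Pre_colorPoints (points : List (List Int)) (categories : List (List (List Int))) (centers : List (List Int)) : Prop :=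
  ∀ (i : Nat) (h : i < categories.length), centers.length ≤ i →
    ∀ p ∈ categories[i], (∀ x ∈ points, ¬ List.Perm x p) ∧ (∀ c ∈ centers, ¬ List.Perm c p)
instance (points : List (List Int)) (categories : List (List (List Int))) (centers : List (List Int)) : Decidable (Pre_colorPoints points categories centers) := by unfold Pre_colorPoints; infer_instance

def pvWitness_colorPoints : List (List Int) × List (List (List Int)) × List (List Int) :=
  ([[1, 2], [3]], [[[2, 1]]], [[5, 5]])

def Spec_colorPoints (points : List (List Int)) (categories : List (List (List Int))) (centers : List (List Int)) (out : List (List Int)) : Prop := out = colorPoints_alt points categories centers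
instance (points : List (List Int)) (categories : List (List (List Int))) (centers : List (List Int)) (out : List (List Int)) : Decidable (Spec_colorPoints points categories centers out) := by unfold Spec_colorPoints; infer_instance

-- ===== CLAIM (what is proved, stated in full; the proofs are below) =====
def Claim_equal_colorPoints : Prop := ∀ (points : List (List Int)) (categories : List (List (List Int))) (centers : List (List Int)), Dom_colorPoints points categories centers → Pre_colorPoints points categories centers → Spec_colorPoints points categories centers (colorPoints points categories centers)

-- ===== LEMMAS AND PROOFS =====

-- The common abstract step: replace every point whose multiset key equals p's by c.
def pvStep (c p : List Int) (pts : List (List Int)) : List (List Int) :=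
  pts.map (fun x => if pvKey x = pvKey p then c else x)

def pvSpec (points : List (List Int)) (categories : List (List (List Int))) (centers : List (List Int)) : List (List Int) :=
  (PySem.List.enumerate categories 0).foldl (fun pts ic =>
    ic.2.foldl (fun pts p => pvStep (PySem.List.pyGetD centers ic.1 []) p pts) pts) points

theorem length_pvStep (c p : List Int) (pts : List (List Int)) : (pvStep c p pts).length = pts.length := by
  simp [pvStep]

theorem getElem_pvStep (c p : List Int) (pts : List (List Int)) (n : Nat) (h : n < pts.length) :
    (pvStep c p pts)[n]'(by simp [pvStep, h]) = if pvKey pts[n] = pvKey p then c else pts[n] := by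
  simp [pvStep]

theorem pvCmp_eq_key (x y : List Int) : pvCmp x y = decide (pvKey x = pvKey y) := by
  simp only [pvCmp, pvKey, decide_eq_decide, PySem.List.sorted_id_eq_sorted_id_iff_perm]
  exact Multiset.coe_eq_coe

-- setting every listed (nonnegative) index to c
theorem foldl_pySetD (idxs : List Int) (c : List Int) (pts : List (List Int))
    (h : ∀ j ∈ idxs, 0 ≤ j) :
    (idxs.foldl (fun a j => PySem.List.pySetD a j c) pts).length = pts.length ∧
    ∀ k : Nat, k < pts.length →
      (idxs.foldl (fun a j => PySem.List.pySetD a j c) pts)[k]? =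
        (if (k : Int) ∈ idxs then some c else pts[k]?) := by
  induction idxs generalizing pts with
  | nil => simp
  | cons j idxs ih =>
    have hj : 0 ≤ j := h j (by simp)
    have h' : ∀ j' ∈ idxs, 0 ≤ j' := fun j' hj' => h j' (by simp [hj'])
    have hlen : (PySem.List.pySetD pts j c).length = pts.length :=
      PySem.List.length_pySetD pts j c
    obtain ⟨ihl, ihg⟩ := ih (PySem.List.pySetD pts j c) h'
    constructor
    · simpa [hlen] using ihl
    · intro k hk
      have := ihg k (by omega)
      simp only [List.foldl_cons] at *
      rw [this]
      rw [PySem.List.pySetD_of_nonneg _ c hj]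
      by_cases hmem : (k : Int) ∈ idxs
      · simp [hmem]
      · by_cases hkj : (k : Int) = j
        · have : j.toNat = k := by omega
          simp [hkj, this, hk]
        · have : j.toNat ≠ k := by omega
          simp [hmem, hkj, this]

-- a list of indices that contains exactly the positions whose key is pvKey p
theorem setAll_eq_step (pts : List (List Int)) (c p : List Int) (idxs : List Int)
    (hmem : ∀ j : Int, j ∈ idxs ↔
      (0 ≤ j ∧ ∃ h : j.toNat < pts.length, pvKey pts[j.toNat] = pvKey p)) :
    idxs.foldl (fun a j => PySem.List.pySetD a j c) pts = pvStep c p pts := by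
  obtain ⟨hlen, hget⟩ := foldl_pySetD idxs c pts (fun j hj => ((hmem j).1 hj).1)
  apply List.ext_getElem?
  intro k
  by_cases hk : k < pts.length
  · rw [hget k hk]
    have hmap : (pvStep c p pts)[k]? = some (if pvKey pts[k] = pvKey p then c else pts[k]) := by
      simp [pvStep, List.getElem?_eq_getElem hk]
    rw [hmap]
    by_cases hkey : pvKey pts[k] = pvKey p
    · rw [if_pos ((hmem k).2 ⟨by omega, by simpa using hk, by simpa using hkey⟩), if_pos hkey]
    · rw [if_neg (fun hm => hkey (by simpa using ((hmem k).1 hm).2.choose_spec)), if_neg hkey]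
      simp [List.getElem?_eq_getElem hk]
  · rw [List.getElem?_eq_none (by omega), List.getElem?_eq_none (by simp [pvStep]; omega)]

-- membership in the filtered-enumerate index list (start 0, arbitrary predicate on the element)
theorem mem_enumFilterMap (pts : List (List Int)) (q : List Int → Bool) (j : Int) :
    j ∈ (((PySem.List.enumerate pts 0).filter (fun jx => q jx.2)).map (fun jx => jx.1)) ↔
      (0 ≤ j ∧ ∃ h : j.toNat < pts.length, q pts[j.toNat] = true) := by
  simp only [List.mem_map, List.mem_filter, PySem.List.mem_enumerate_iff]
  constructor
  · rintro ⟨⟨j', x⟩, ⟨⟨k, hk, heq⟩, hq⟩, rfl⟩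
    obtain ⟨rfl, rfl⟩ := Prod.mk.injEq .. ▸ heq
    simp only at hq ⊢
    refine ⟨by omega, by simpa using hk, by simpa using hq⟩
  · rintro ⟨hj, hk, hq⟩
    exact ⟨(j, pts[j.toNat]), ⟨⟨j.toNat, hk, by simp [Int.toNat_of_nonneg hj]⟩, hq⟩, rfl⟩

theorem A_step (pts : List (List Int)) (p c : List Int) :
    ((((PySem.List.enumerate pts 0).filter (fun jx => pvCmp jx.2 p)).map (fun jx => jx.1)).foldl
        (fun a j => PySem.List.pySetD a j c) pts) = pvStep c p pts := by
  apply setAll_eq_step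
  intro j
  refine (mem_enumFilterMap pts (fun x => pvCmp x p) j).trans ?_
  simp [pvCmp_eq_key]

theorem A_eq_spec (points : List (List Int)) (categories : List (List (List Int))) (centers : List (List Int)) :
    colorPoints points categories centers = pvSpec points categories centers := by
  unfold colorPoints pvSpec
  congr 1
  funext pts ic
  congr 1
  funext pts p
  exact A_step pts p _

-- the index invariant: d maps each key to exactly the indices of the points having that key
def pvInv (pts : List (List Int)) (d : PySem.Dict (List Int) (List Int)) : Prop :=
  ∀ (k : List Int) (j : Int), j ∈ d.getD k [] ↔
    (0 ≤ j ∧ ∃ h : j.toNat < pts.length, pvKey pts[j.toNat] = k)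

theorem build_getD (xs : List (List Int)) (s : Int) (d : PySem.Dict (List Int) (List Int)) (k : List Int) :
    ((PySem.List.enumerate xs s).foldl
        (fun d jx => d.modify (pvKey jx.2) [] (fun l => l ++ [jx.1])) d).getD k []
      = d.getD k [] ++
        (((PySem.List.enumerate xs s).filter (fun jx => pvKey jx.2 == k)).map (fun jx => jx.1)) := by
  induction xs generalizing s d with
  | nil => simp [PySem.List.enumerate_nil]
  | cons x xs ih =>
    rw [PySem.List.enumerate_cons]
    simp only [List.foldl_cons, List.filter_cons]
    rw [ih]
    by_cases hk : pvKey x = k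
    · subst hk
      rw [PySem.Dict.getD_modify_self]
      simp
    · rw [PySem.Dict.getD_modify_of_ne _ _ _ (fun h => hk h.symm)]
      simp [beq_iff_eq, hk]

theorem pvInv_init (points : List (List Int)) :
    pvInv points ((PySem.List.enumerate points 0).foldl
      (fun d jx => d.modify (pvKey jx.2) [] (fun l => l ++ [jx.1])) PySem.Dict.empty) := by
  intro k j
  rw [build_getD]
  simp only [PySem.Dict.getD_empty, List.nil_append]
  have h := mem_enumFilterMap points (fun x => pvKey x == k) j
  simp only [beq_iff_eq] at h
  exact h

-- Inv is stable under replacing the points by a same-length, same-keys list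
theorem pvInv_congr (pts pts' : List (List Int)) (d : PySem.Dict (List Int) (List Int))
    (hlen : pts'.length = pts.length)
    (hkey : ∀ n (h : n < pts.length), pvKey (pts'[n]'(by omega)) = pvKey pts[n])
    (hinv : pvInv pts d) : pvInv pts' d := by
  intro k j
  rw [hinv k j]
  constructor
  · rintro ⟨hj, hn, hkeq⟩
    exact ⟨hj, by omega, by rw [hkey j.toNat hn]; exact hkeq⟩
  · rintro ⟨hj, hn, hkeq⟩
    have hn' : j.toNat < pts.length := by omega
    exact ⟨hj, hn', by rw [← hkey j.toNat hn']; exact hkeq⟩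

theorem B_step (pts : List (List Int)) (d : PySem.Dict (List Int) (List Int))
    (centers : List (List Int)) (i : Int) (p : List Int)
    (hinv : pvInv pts d) :
    (pvBodyB centers i (pts, d) p).1 = pvStep (PySem.List.pyGetD centers i []) p pts ∧
    pvInv (pvStep (PySem.List.pyGetD centers i []) p pts) (pvBodyB centers i (pts, d) p).2 := by
  simp only [pvBodyB]
  set c := PySem.List.pyGetD centers i []
  by_cases hjs : d.getD (pvKey p) [] = ([] : List Int)
  · rw [if_pos hjs]
    have hnone : ∀ (n : Nat) (h : n < pts.length), pvKey pts[n] ≠ pvKey p := by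
      intro n h hkeq
      have hm : (n : Int) ∈ d.getD (pvKey p) [] :=
        (hinv (pvKey p) n).2 ⟨by omega, by simpa using h, by simpa using hkeq⟩
      rw [hjs] at hm
      exact absurd hm (List.not_mem_nil)
    have hstep : pvStep c p pts = pts := by
      apply List.ext_getElem (by simp [pvStep])
      intro n h1 h2
      rw [getElem_pvStep _ _ _ _ h2, if_neg (hnone n h2)]
    exact ⟨by simp [hstep], by rw [hstep]; exact hinv⟩
  · rw [if_neg hjs]
    have hset : (d.getD (pvKey p) []).foldl (fun a j => PySem.List.pySetD a j c) pts = pvStep c p pts :=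
      setAll_eq_step pts c p _ (fun j => hinv (pvKey p) j)
    by_cases hck : pvKey c = pvKey p
    · rw [if_pos hck]
      refine ⟨hset, ?_⟩
      apply pvInv_congr pts _ d (length_pvStep ..) ?_ hinv
      intro n h
      rw [getElem_pvStep _ _ _ _ h]
      by_cases hkeq : pvKey pts[n] = pvKey p
      · rw [if_pos hkeq, hck, hkeq]
      · rw [if_neg hkeq]
    · rw [if_neg hck]
      refine ⟨hset, ?_⟩
      intro k j
      simp only
      rw [PySem.Dict.getD_insert, PySem.Dict.getD_modify]
      constructor
      · intro hmem
        by_cases hkp : k = pvKey p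
        · rw [if_pos hkp] at hmem
          exact absurd hmem (List.not_mem_nil)
        · rw [if_neg hkp] at hmem
          by_cases hkc : k = pvKey c
          · rw [if_pos hkc] at hmem
            rcases List.mem_append.1 hmem with hm | hm
            · obtain ⟨hj, hn, hkeq⟩ := (hinv (pvKey c) j).1 hm
              refine ⟨hj, by rw [length_pvStep]; exact hn, ?_⟩
              rw [getElem_pvStep _ _ _ _ hn, if_neg (by rw [hkeq]; exact hck), hkeq, hkc]
            · obtain ⟨hj, hn, hkeq⟩ := (hinv (pvKey p) j).1 hm
              refine ⟨hj, by rw [length_pvStep]; exact hn, ?_⟩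
              rw [getElem_pvStep _ _ _ _ hn, if_pos hkeq, hkc]
          · rw [if_neg hkc] at hmem
            obtain ⟨hj, hn, hkeq⟩ := (hinv k j).1 hmem
            refine ⟨hj, by rw [length_pvStep]; exact hn, ?_⟩
            rw [getElem_pvStep _ _ _ _ hn, if_neg (fun h => hkp (hkeq.symm.trans h))]
            exact hkeq
      · rintro ⟨hj, hn, hkeq⟩
        have hn' : j.toNat < pts.length := by
          have := length_pvStep c p pts; omega
        rw [getElem_pvStep _ _ _ _ hn'] at hkeq
        by_cases hmatch : pvKey pts[j.toNat] = pvKey p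
        · rw [if_pos hmatch] at hkeq
          have hkp : k ≠ pvKey p := by rw [← hkeq]; exact hck
          rw [if_neg hkp, if_pos hkeq.symm]
          exact List.mem_append.2 (Or.inr ((hinv (pvKey p) j).2 ⟨hj, hn', hmatch⟩))
        · rw [if_neg hmatch] at hkeq
          have hkp : k ≠ pvKey p := fun h => hmatch (by rw [hkeq, h])
          rw [if_neg hkp]
          by_cases hkc : k = pvKey c
          · rw [if_pos hkc]
            exact List.mem_append.2 (Or.inl ((hinv (pvKey c) j).2 ⟨hj, hn', by rw [hkeq, hkc]⟩))
          · rw [if_neg hkc]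
            exact (hinv k j).2 ⟨hj, hn', hkeq⟩

theorem B_inner (cat : List (List Int)) (centers : List (List Int)) (i : Int)
    (pts : List (List Int)) (d : PySem.Dict (List Int) (List Int)) (hinv : pvInv pts d) :
    (cat.foldl (pvBodyB centers i) (pts, d)).1 =
      cat.foldl (fun pts p => pvStep (PySem.List.pyGetD centers i []) p pts) pts ∧
    pvInv (cat.foldl (fun pts p => pvStep (PySem.List.pyGetD centers i []) p pts) pts)
      (cat.foldl (pvBodyB centers i) (pts, d)).2 := by
  induction cat generalizing pts d with
  | nil => exact ⟨rfl, hinv⟩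
  | cons p cat ih =>
    obtain ⟨h1, h2⟩ := B_step pts d centers i p hinv
    simp only [List.foldl_cons]
    have : pvBodyB centers i (pts, d) p =
        (pvStep (PySem.List.pyGetD centers i []) p pts, (pvBodyB centers i (pts, d) p).2) := by
      rw [← h1]
    rw [this]
    exact ih _ _ h2

theorem B_outer (cats : List (List (List Int))) (s : Int) (centers : List (List Int))
    (pts : List (List Int)) (d : PySem.Dict (List Int) (List Int)) (hinv : pvInv pts d) :
    ((PySem.List.enumerate cats s).foldl (fun st ic => ic.2.foldl (pvBodyB centers ic.1) st) (pts, d)).1 =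
      (PySem.List.enumerate cats s).foldl (fun pts ic =>
        ic.2.foldl (fun pts p => pvStep (PySem.List.pyGetD centers ic.1 []) p pts) pts) pts := by
  induction cats generalizing s pts d with
  | nil => simp [PySem.List.enumerate_nil]
  | cons cat cats ih =>
    rw [PySem.List.enumerate_cons]
    simp only [List.foldl_cons]
    obtain ⟨h1, h2⟩ := B_inner cat centers s pts d hinv
    have : cat.foldl (pvBodyB centers s) (pts, d) =
        (cat.foldl (fun pts p => pvStep (PySem.List.pyGetD centers s []) p pts) pts,
         (cat.foldl (pvBodyB centers s) (pts, d)).2) := by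
      rw [← h1]
    rw [this]
    exact ih (s + 1) _ _ h2

theorem B_eq_spec (points : List (List Int)) (categories : List (List (List Int))) (centers : List (List Int)) :
    colorPoints_alt points categories centers = pvSpec points categories centers := by
  unfold colorPoints_alt pvSpec
  exact B_outer categories 0 centers points _ (pvInv_init points)

-- ===== VERDICT (by name: the statement is the Claim_ definition above) =====
theorem colorPoints_spec : Claim_equal_colorPoints := by
  intro points categories centers _ _
  unfold Spec_colorPoints
  rw [A_eq_spec, B_eq_spec]
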